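-- pv_equiv track=rewrite | github.com/freshman-zhou/lark-agent | packages/integrations/feishu/doc/cli_runner.py | _safe_args
-- ===== SOURCE A (Python) =====
-- def _safe_args(args: list[str]) -> list[str]:
--     secret_keys = {"--app-secret", "--secret", "--token", "--access-token"}
--     safe_args: list[str] = []
--     mask_next = False
--
--     for arg in args:
--         if mask_next:
--             safe_args.append("***")
--             mask_next = False
--             continue
--
--         if arg in secret_keys:
--             safe_args.append(arg)
--             mask_next = True
--             continue
--
--         if any(part in arg.lower() for part in ["secret=", "token=", "password="]):
--             key = arg.split("=", 1)[0]
--             safe_args.append(f"{key}=***")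
--             continue
--
--         safe_args.append(arg)
--
--     return safe_args
-- ===== SOURCE B (Python) =====
-- _SECRET_KEYS = frozenset({"--app-secret", "--secret", "--token", "--access-token"})
-- _PATTERNS = ("secret=", "token=", "password=")
--
--
-- def _mask_one(arg: str) -> str:
--     low = arg.lower()
--     if any(p in low for p in _PATTERNS):
--         return arg.split("=", 1)[0] + "=***"
--     return arg
--
--
-- def _safe_args(args: list[str]) -> list[str]:
--     # Pass 1: mark the positions to blank out.  A position is blanked when the
--     # previous argument is a secret key that was not itself blanked.
--     n = len(args)
--     blank = [False] * n
--     for i in range(n - 1):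
--         if not blank[i] and args[i] in _SECRET_KEYS:
--             blank[i + 1] = True
--     # Pass 2: stateless element-wise rendering from the precomputed marks.
--     return [
--         "***" if blank[i]
--         else (args[i] if args[i] in _SECRET_KEYS else _mask_one(args[i]))
--         for i in range(n)
--     ]
-- ===== Notes on version B (the rewrite author's own statement) =====
-- stated objective: alternative
-- what changed: Mark-then-map in two staged passes: the first pass precomputes a boolean blank array of positions to redact (guarded so an already-blanked secret key cannot trigger), the second pass is a stateless element-wise rendering from those marks, instead of A's single pass carrying a mask_next flag through the loop.
import Mathlib
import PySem

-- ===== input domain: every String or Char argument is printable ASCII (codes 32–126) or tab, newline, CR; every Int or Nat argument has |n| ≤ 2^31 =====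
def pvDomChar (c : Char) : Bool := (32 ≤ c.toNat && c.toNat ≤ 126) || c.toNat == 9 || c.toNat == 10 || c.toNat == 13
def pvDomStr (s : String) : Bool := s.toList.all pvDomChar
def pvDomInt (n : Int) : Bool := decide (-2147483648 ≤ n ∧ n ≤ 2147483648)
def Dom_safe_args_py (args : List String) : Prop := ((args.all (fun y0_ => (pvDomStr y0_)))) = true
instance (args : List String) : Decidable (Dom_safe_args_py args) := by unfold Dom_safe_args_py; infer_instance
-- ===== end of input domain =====

-- B replaces A's single stateful pass (mask_next flag) by two staged passes: a marking
-- pass that precomputes the boolean blank array, then a stateless element-wise map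
-- (objective: alternative; same output, same asymptotic cost).

-- ===== PORT A =====
-- A: one for-loop appending to safe_args, carrying the mask_next flag.
def safe_args_py (args : List String) : List String :=
  (args.foldl (fun (s : List String × Bool) arg =>
    if s.2 then (s.1 ++ ["***"], false)
    else if PySem.Set.contains
        (PySem.Set.ofList ["--app-secret", "--secret", "--token", "--access-token"]) arg then
      (s.1 ++ [arg], true)
    else if (["secret=", "token=", "password="].any
        (fun part => PySem.Str.isIn part (PySem.Str.lower arg))) then
      (s.1 ++ [(match PySem.Str.splitMax? arg "=" 1 with
                | some (k :: _) => k ++ "=***"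
                | _ => "=***")], false)
    else (s.1 ++ [arg], false)) ([], false)).1

-- ===== PORT B =====
-- B-side helpers: frozenset membership and the per-element renderer _mask_one.
def altIsSecret (arg : String) : Bool :=
  PySem.Set.contains
    (PySem.Set.ofList ["--app-secret", "--secret", "--token", "--access-token"]) arg

def altMaskOne (arg : String) : String :=
  let low := PySem.Str.lower arg
  if (["secret=", "token=", "password="].any (fun p => PySem.Str.isIn p low)) then
    -- arg.split("=", 1)[0]: splitMax? with the non-empty separator "=" always returns
    -- some non-empty list, so head-with-default is exact here
    (((PySem.Str.splitMax? arg "=" 1).getD []).headD "") ++ "=***"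
  else arg

-- B: pass 1 marks positions to blank in a boolean array, pass 2 is a stateless map.
def safe_args_py_alt (args : List String) : List String :=
  let n := args.length
  let blank := (List.range (n - 1)).foldl
    (fun (bl : List Bool) i =>
      if (!(bl.getD i false) && altIsSecret (args.getD i "")) then bl.set (i + 1) true
      else bl)
    (List.replicate n false)
  (List.range n).map (fun i =>
    if blank.getD i false then "***"
    else if altIsSecret (args.getD i "") then args.getD i ""
    else altMaskOne (args.getD i ""))

-- ===== PRECONDITION & SPEC =====
def Spec_safe_args_py (args : List String) (out : List String) : Prop := out = safe_args_py_alt args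
instance (args : List String) (out : List String) : Decidable (Spec_safe_args_py args out) := by unfold Spec_safe_args_py; infer_instance

-- ===== CLAIM (what is proved, stated in full; the proofs are below) =====
def Claim_equal_safe_args_py : Prop := ∀ (args : List String), Dom_safe_args_py args → Spec_safe_args_py args (safe_args_py args)

-- ===== LEMMAS AND PROOFS =====

-- A's loop body, named
def pvAStep (s : List String × Bool) (arg : String) : List String × Bool :=
  if s.2 then (s.1 ++ ["***"], false)
  else if PySem.Set.contains
      (PySem.Set.ofList ["--app-secret", "--secret", "--token", "--access-token"]) arg then
    (s.1 ++ [arg], true)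
  else if (["secret=", "token=", "password="].any
      (fun part => PySem.Str.isIn part (PySem.Str.lower arg))) then
    (s.1 ++ [(match PySem.Str.splitMax? arg "=" 1 with
              | some (k :: _) => k ++ "=***"
              | _ => "=***")], false)
  else (s.1 ++ [arg], false)

lemma pvA_eq_foldl (args : List String) :
    safe_args_py args = (args.foldl pvAStep ([], false)).1 := rfl

lemma pvStep_true (acc : List String) (a : String) :
    pvAStep (acc, true) a = (acc ++ ["***"], false) := rfl

lemma pvStep_secret (acc : List String) (a : String) (hs : altIsSecret a = true) :
    pvAStep (acc, false) a = (acc ++ [a], true) := by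
  have : PySem.Set.contains
      (PySem.Set.ofList ["--app-secret", "--secret", "--token", "--access-token"]) a = true := hs
  simp only [pvAStep, Bool.false_eq_true, if_false, this, if_true]

lemma pvStep_mask (acc : List String) (a : String) (hs : altIsSecret a = false) :
    pvAStep (acc, false) a = (acc ++ [altMaskOne a], false) := by
  have : PySem.Set.contains
      (PySem.Set.ofList ["--app-secret", "--secret", "--token", "--access-token"]) a = false := hs
  have hmatch : ∀ o : Option (List String),
      (match o with
       | some (k :: _) => k ++ "=***"
       | _ => "=***") = ((o.getD []).headD "") ++ "=***" := by
    intro o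
    cases o with
    | none => rfl
    | some l => cases l with
      | nil => rfl
      | cons k t => rfl
  simp only [pvAStep, Bool.false_eq_true, if_false, this, altMaskOne, hmatch]
  split_ifs with hm <;> rfl

-- the common recursive specification of both programs
def pvSpecRec : List String → Bool → List String
  | [], _ => []
  | _ :: t, true => "***" :: pvSpecRec t false
  | a :: t, false =>
      if altIsSecret a then a :: pvSpecRec t true else altMaskOne a :: pvSpecRec t false

-- the element-wise renderer and the flag sequence (mask_next at each position)
def pvG (a : String) (f : Bool) : String :=
  if f then "***" else if altIsSecret a then a else altMaskOne a

def pvFlags : List String → Bool → List Bool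
  | [], _ => []
  | a :: t, b => b :: pvFlags t (!b && altIsSecret a)

lemma pvFlags_length (l : List String) (b : Bool) : (pvFlags l b).length = l.length := by
  induction l generalizing b with
  | nil => rfl
  | cons a t ih => simp [pvFlags, ih]

lemma pvFlags_getD_zero (l : List String) (b : Bool) (h : 0 < l.length) :
    (pvFlags l b).getD 0 false = b := by
  cases l with
  | nil => simp at h
  | cons a t => rfl

lemma pvFlags_getD_succ (l : List String) (b : Bool) (i : Nat) (h : i + 1 < l.length) :
    (pvFlags l b).getD (i + 1) false
      = (!((pvFlags l b).getD i false) && altIsSecret (l.getD i "")) := by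
  induction l generalizing b i with
  | nil => simp at h
  | cons a t ih =>
      cases i with
      | zero =>
          have ht : 0 < t.length := by simp at h; omega
          simp only [pvFlags, List.getD_cons_succ, List.getD_cons_zero]
          exact pvFlags_getD_zero t _ ht
      | succ j =>
          have ht : j + 1 < t.length := by simp at h; omega
          simp only [pvFlags, List.getD_cons_succ]
          exact ih _ j ht

lemma pvSpecRec_cons (a : String) (t : List String) (b : Bool) :
    pvSpecRec (a :: t) b = pvG a b :: pvSpecRec t (!b && altIsSecret a) := by
  cases b with
  | true => rfl
  | false =>
      simp only [pvSpecRec, pvG, Bool.false_eq_true, if_false, Bool.not_false, Bool.true_and]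
      cases hs : altIsSecret a <;> simp [hs]

lemma pvSpecRec_eq_zipWith (l : List String) (b : Bool) :
    pvSpecRec l b = List.zipWith pvG l (pvFlags l b) := by
  induction l generalizing b with
  | nil => rfl
  | cons a t ih => rw [pvSpecRec_cons, pvFlags, List.zipWith_cons_cons, ih]

-- A's fold equals the recursive spec
lemma pvFoldlEq (l : List String) (acc : List String) (b : Bool) :
    (l.foldl pvAStep (acc, b)).1 = acc ++ pvSpecRec l b := by
  induction l generalizing acc b with
  | nil => simp [pvSpecRec]
  | cons a t ih =>
      cases b with
      | true =>
          rw [List.foldl_cons, pvStep_true, ih]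
          simp [pvSpecRec]
      | false =>
          by_cases hs : altIsSecret a = true
          · rw [List.foldl_cons, pvStep_secret acc a hs, ih]
            simp [pvSpecRec, hs]
          · rw [Bool.not_eq_true] at hs
            rw [List.foldl_cons, pvStep_mask acc a hs, ih]
            simp [pvSpecRec, hs]

lemma pvA_eq_rec (args : List String) : safe_args_py args = pvSpecRec args false := by
  rw [pvA_eq_foldl, pvFoldlEq]; simp

-- B's marking pass: its fold builds exactly the flag sequence, prefix by prefix
def pvBStep (args : List String) (bl : List Bool) (i : Nat) : List Bool :=
  if (!(bl.getD i false) && altIsSecret (args.getD i "")) then bl.set (i + 1) true else bl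

lemma pvBlankInv (args : List String) (m : Nat) (h : m + 1 ≤ args.length) :
    (List.range m).foldl (pvBStep args) (List.replicate args.length false)
      = (pvFlags args false).take (m + 1)
          ++ List.replicate (args.length - (m + 1)) false := by
  induction m with
  | zero =>
      cases args with
      | nil => simp at h
      | cons a t =>
          simp [pvFlags, List.replicate_succ]
  | succ m ih =>
      have hm : m + 1 ≤ args.length := by omega
      have hflen : (pvFlags args false).length = args.length := pvFlags_length args false
      rw [List.range_succ, List.foldl_append, ih hm]
      set fl := pvFlags args false with hfl
      have hgetm :
          ((fl.take (m + 1) ++ List.replicate (args.length - (m + 1)) false).getD m false)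
            = fl.getD m false := by
        have hm' : m < (fl.take (m + 1)).length := by
          rw [List.length_take]; omega
        rw [List.getD_eq_getElem?_getD, List.getElem?_append_left hm',
            List.getElem?_take_of_lt (by omega), ← List.getD_eq_getElem?_getD]
      have hsucc : fl.getD (m + 1) false
          = (!(fl.getD m false) && altIsSecret (args.getD m "")) := by
        exact pvFlags_getD_succ args false m (by omega)
      simp only [List.foldl_cons, List.foldl_nil, pvBStep, hgetm]
      have htake : fl.take (m + 2) = fl.take (m + 1) ++ [fl.getD (m + 1) false] := by
        have hlt : m + 1 < fl.length := by omega
        rw [List.take_add_one, List.getElem?_eq_getElem hlt]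
        simp [List.getD_eq_getElem?_getD, List.getElem?_eq_getElem hlt]
      have hrep : List.replicate (args.length - (m + 1)) false
          = false :: List.replicate (args.length - (m + 2)) false := by
        have : args.length - (m + 1) = (args.length - (m + 2)) + 1 := by omega
        rw [this, List.replicate_succ]
      by_cases hc : (!(fl.getD m false) && altIsSecret (args.getD m "")) = true
      · rw [if_pos hc, htake, hsucc, hc, hrep]
        have hlen1 : (fl.take (m + 1)).length = m + 1 := by
          rw [List.length_take]; omega
        rw [List.set_append_right _ _ (by omega), List.append_assoc]
        simp [hlen1]
      · rw [Bool.not_eq_true] at hc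
        rw [if_neg (by rw [hc]; simp), htake, hsucc, hc, hrep, List.append_assoc]
        rfl

lemma pvBlank_eq_flags (args : List String) (h : 0 < args.length) :
    (List.range (args.length - 1)).foldl (pvBStep args) (List.replicate args.length false)
      = pvFlags args false := by
  have h1 : (args.length - 1) + 1 ≤ args.length := by omega
  rw [pvBlankInv args (args.length - 1) h1]
  have h2 : (args.length - 1) + 1 = args.length := by omega
  rw [h2]
  have hflen : (pvFlags args false).length = args.length := pvFlags_length args false
  simp [List.take_of_length_le (le_of_eq hflen)]

lemma pvMapRange_eq_zipWith (l : List String) (fl : List Bool) (h : fl.length = l.length) :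
    (List.range l.length).map (fun i => pvG (l.getD i "") (fl.getD i false))
      = List.zipWith pvG l fl := by
  apply List.ext_getElem
  · simp [h]
  · intro i h1 h2
    have hi : i < l.length := by simpa using h1
    have hif : i < fl.length := by omega
    simp [List.getD_eq_getElem?_getD, List.getElem?_eq_getElem hi,
      List.getElem?_eq_getElem hif]

lemma pvB_eq_rec (args : List String) : safe_args_py_alt args = pvSpecRec args false := by
  cases hargs : args with
  | nil => rfl
  | cons a t =>
      rw [← hargs]
      have hpos : 0 < args.length := by rw [hargs]; simp
      show (List.range args.length).map (fun i =>
          if ((List.range (args.length - 1)).foldl (pvBStep args)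
              (List.replicate args.length false)).getD i false then "***"
          else if altIsSecret (args.getD i "") then args.getD i ""
          else altMaskOne (args.getD i "")) = pvSpecRec args false
      rw [pvBlank_eq_flags args hpos]
      have hg : (fun i =>
          if (pvFlags args false).getD i false then "***"
          else if altIsSecret (args.getD i "") then args.getD i ""
          else altMaskOne (args.getD i ""))
          = fun i => pvG (args.getD i "") ((pvFlags args false).getD i false) := by
        funext i; rw [pvG]
      rw [hg, pvMapRange_eq_zipWith args (pvFlags args false) (pvFlags_length args false),
        pvSpecRec_eq_zipWith]

-- ===== VERDICT (by name: the statement is the Claim_ definition above) =====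
theorem safe_args_py_spec : Claim_equal_safe_args_py := by
  intro args _
  unfold Spec_safe_args_py
  rw [pvA_eq_rec, pvB_eq_rec]
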